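-- pv_equiv track=rewrite | github.com/hdong026/BasicSTFM | src/basicstfm/utils/results.py | _ordered_fieldnames
-- ===== SOURCE A (Python) =====
-- from typing import Any, Dict, Iterable, List, Mapping, Optional, Sequence, Tuple
--
-- def _ordered_fieldnames(rows: Sequence[Dict[str, Any]]) -> List[str]:
--     preferred = [
--         "experiment_name",
--         "stage_name",
--         "dataset",
--         "model_type",
--         "task",
--         "train_fraction",
--         "checkpoint",
--     ]
--     seen = []
--     for key in preferred:
--         if any(key in row for row in rows):
--             seen.append(key)
--     for row in rows:
--         for key in row:
--             if key not in seen: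
--                 seen.append(key)
--     return seen
-- ===== SOURCE B (Python) =====
-- def _ordered_fieldnames(rows):
--     preferred = [
--         "experiment_name",
--         "stage_name",
--         "dataset",
--         "model_type",
--         "task",
--         "train_fraction",
--         "checkpoint",
--     ]
--     # one pass: distinct keys in discovery order
--     union = list(dict.fromkeys(key for row in rows for key in row))
--     present = set(union)
--     pref = set(preferred)
--     return [k for k in preferred if k in present] + [k for k in union if k not in pref]
-- ===== Notes on version B (the rewrite author's own statement) =====
-- stated objective: faster
-- what changed: Replaces A's per-preferred-key rescans of all rows and the 'key not in seen' list-membership dedup loop by one dict.fromkeys pass building the discovery-order key union plus set-membership filters.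
import Mathlib
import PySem

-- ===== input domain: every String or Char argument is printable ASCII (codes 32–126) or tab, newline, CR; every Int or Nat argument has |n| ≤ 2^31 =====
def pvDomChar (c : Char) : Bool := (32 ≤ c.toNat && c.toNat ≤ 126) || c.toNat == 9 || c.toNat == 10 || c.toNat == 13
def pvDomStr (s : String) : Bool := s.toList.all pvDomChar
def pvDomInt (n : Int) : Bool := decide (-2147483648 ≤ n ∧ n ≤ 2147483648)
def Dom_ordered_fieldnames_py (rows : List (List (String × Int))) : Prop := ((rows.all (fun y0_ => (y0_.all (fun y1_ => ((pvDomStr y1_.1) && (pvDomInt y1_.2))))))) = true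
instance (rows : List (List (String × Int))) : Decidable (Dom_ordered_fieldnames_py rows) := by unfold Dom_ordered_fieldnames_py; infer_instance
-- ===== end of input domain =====

-- B builds the discovery-order key union in one dict.fromkeys pass and emits two set-membership filters (preferred-present, then non-preferred union keys) instead of A's per-preferred-key rescans of all rows plus a list-membership dedup loop; objective: faster (measured).

def pvPreferred : List String :=
  ["experiment_name", "stage_name", "dataset", "model_type", "task", "train_fraction", "checkpoint"]

-- ===== PORT A =====
def ordered_fieldnames_py (rows : List (List (String × Int))) : List String :=
  let seen := pvPreferred.foldl (fun seen key =>
    if rows.any (fun row => row.any (fun p => p.1 == key)) then seen ++ [key] else seen) []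
  rows.foldl (fun seen row =>
    row.foldl (fun seen p => if seen.contains p.1 then seen else seen ++ [p.1]) seen) seen

-- ===== PORT B =====
def ordered_fieldnames_py_alt (rows : List (List (String × Int))) : List String :=
  -- list(dict.fromkeys(key for row in rows for key in row)) : distinct keys, first-seen order
  let union : PySem.Set String := PySem.Set.ofList (rows.flatMap (fun row => row.map Prod.fst))
  let present : PySem.Set String := PySem.Set.ofList union
  let pref : PySem.Set String := PySem.Set.ofList pvPreferred
  pvPreferred.filter (fun k => PySem.Set.contains present k)
    ++ union.filter (fun k => !(PySem.Set.contains pref k))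

-- ===== PRECONDITION & SPEC =====
def Spec_ordered_fieldnames_py (rows : List (List (String × Int))) (out : List String) : Prop := out = ordered_fieldnames_py_alt rows
instance (rows : List (List (String × Int))) (out : List String) : Decidable (Spec_ordered_fieldnames_py rows out) := by unfold Spec_ordered_fieldnames_py; infer_instance

-- ===== CLAIM (what is proved, stated in full; the proofs are below) =====
def Claim_equal_ordered_fieldnames_py : Prop := ∀ (rows : List (List (String × Int))), Dom_ordered_fieldnames_py rows → Spec_ordered_fieldnames_py rows (ordered_fieldnames_py rows)

-- ===== LEMMAS AND PROOFS =====

-- A's dedup-append step is exactly PySem.Set.add on the key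
lemma pv_inner_fold_eq_update (row : List (String × Int)) (s : List String) :
    row.foldl (fun seen p => if seen.contains p.1 then seen else seen ++ [p.1]) s
      = PySem.Set.update s (row.map Prod.fst) := by
  induction row generalizing s with
  | nil => rfl
  | cons p ps ih =>
      have hadd : (if s.contains p.1 = true then s else s ++ [p.1]) = PySem.Set.add s p.1 := by
        rw [PySem.Set.add_eq_ite]
        by_cases h : p.1 ∈ s <;> simp [h]
      rw [List.foldl_cons, List.map_cons, PySem.Set.update_cons, ih, hadd]

-- A's nested second loop = one update with all keys flattened
lemma pv_outer_fold_eq_update (rows : List (List (String × Int))) (s : List String) :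
    rows.foldl (fun seen row =>
        row.foldl (fun seen p => if seen.contains p.1 then seen else seen ++ [p.1]) seen) s
      = PySem.Set.update s (rows.flatMap (fun row => row.map Prod.fst)) := by
  induction rows generalizing s with
  | nil => rfl
  | cons r rs ih =>
      rw [List.foldl_cons, pv_inner_fold_eq_update, ih, List.flatMap_cons, PySem.Set.update_append]

-- ===== VERDICT =====
theorem ordered_fieldnames_py_spec : Claim_equal_ordered_fieldnames_py := by
  intro rows _
  unfold Spec_ordered_fieldnames_py ordered_fieldnames_py ordered_fieldnames_py_alt
  simp only [pv_outer_fold_eq_update, PySem.List.foldl_append_if_eq_filter,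
    List.nil_append, PySem.Set.update_eq_append_filter]
  have hpref : PySem.Set.ofList pvPreferred = pvPreferred := by decide
  rw [hpref]
  set flat := rows.flatMap (fun row => row.map Prod.fst) with hflat
  have hcond : ∀ k : String,
      (rows.any (fun row => row.any (fun p => p.1 == k))) = (PySem.Set.ofList flat).contains k := by
    intro k
    rw [Bool.eq_iff_iff]
    simp only [List.any_eq_true, PySem.Set.contains_eq_listContains, List.contains_iff_mem,
      PySem.Set.mem_ofList, hflat, List.mem_flatMap, List.mem_map, beq_iff_eq]
  have h1 : pvPreferred.filter (fun key => rows.any (fun row => row.any (fun p => p.1 == key)))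
      = pvPreferred.filter (fun k => PySem.Set.contains (PySem.Set.ofList (PySem.Set.ofList flat)) k) := by
    refine List.filter_congr ?_
    intro k _
    rw [hcond k, PySem.Set.ofList_ofList]
  rw [h1]
  congr 1
  -- remaining keys: every union key occurs in rows, so A's preferred-present prefix
  -- contains it exactly when the preferred list does
  refine List.filter_congr ?_
  intro k hk
  simp only [PySem.Set.contains_eq_listContains]
  congr 1
  rw [Bool.eq_iff_iff]
  simp only [List.contains_iff_mem, List.mem_filter]
  exact ⟨fun h => h.1, fun h => ⟨h, by rw [PySem.Set.ofList_ofList]; exact hk⟩⟩
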